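-- pv_equiv track=rewrite | github.com/AnMunSR/StudyPython | BaiTapXuLyChuoi/Bai51.py | phanTach
-- ===== SOURCE A (Python) =====
-- def phanTach(s):
--     count = 0
--     lst = []
--     for i in range(0, len(s)):
--         if count == 3:
--             lst.append('.')
--             count = 0
--         count += 1
--         lst.append(s[i])
--     s1 = " ".join(lst)
--     return s1
-- ===== SOURCE B (Python) =====
-- def phanTach(s):
--     chunks = [s[i:i+3] for i in range(0, len(s), 3)]
--     return " . ".join(" ".join(chunk) for chunk in chunks)
-- ===== Notes on version B (the rewrite author's own statement) =====
-- stated objective: simpler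
-- what changed: Replaces the per-character counter loop that flat-appends dots and characters with a group-wise decomposition: slice the string into 3-character chunks, space-join each chunk, and join the chunks with a space-flanked dot separator.
import Mathlib
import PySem

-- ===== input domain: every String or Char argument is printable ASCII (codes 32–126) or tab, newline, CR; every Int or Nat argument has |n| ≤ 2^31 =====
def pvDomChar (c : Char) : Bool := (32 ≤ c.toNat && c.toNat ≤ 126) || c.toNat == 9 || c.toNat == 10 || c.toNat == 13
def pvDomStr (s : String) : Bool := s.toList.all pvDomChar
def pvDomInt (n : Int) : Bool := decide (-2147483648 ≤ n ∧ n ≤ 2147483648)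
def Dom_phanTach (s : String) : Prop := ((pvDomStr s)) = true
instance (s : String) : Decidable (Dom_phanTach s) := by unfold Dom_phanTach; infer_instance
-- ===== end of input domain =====

-- B replaces A's per-character counter loop (flat list of chars and dots) by slicing into 3-char chunks and a two-level join (simpler decomposition; same output).

-- ===== PORT A =====
-- Python's list holds the 1-char strings s[i] and "."; each element is a List Char here.
def phanTachStep (st : Int × List (List Char)) (c : Char) : Int × List (List Char) :=
  let count := st.1
  let lst := st.2
  let (count, lst) := if count == 3 then ((0:Int), lst ++ [['.']]) else (count, lst)
  let count := count + 1
  (count, lst ++ [[c]])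

def phanTach (s : String) : String :=
  let cs := s.toList
  let st := (PySem.List.pyRange 0 (PySem.List.len cs) 1).foldl
      (fun st i => phanTachStep st (PySem.List.pyGetD cs i ' ')) ((0:Int), ([] : List (List Char)))
  String.ofList (PySem.Chars.join [' '] st.2)

-- ===== PORT B =====
def phanTach_alt (s : String) : String :=
  let cs := s.toList
  let chunks := (PySem.List.pyRange 0 (PySem.List.len cs) 3).map
      (fun i => PySem.List.slice cs (some i) (some (i + 3)))
  String.ofList (PySem.Chars.join " . ".toList
    (chunks.map (fun ch => PySem.Chars.join [' '] (ch.map (fun c => [c])))))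

-- ===== PRECONDITION & SPEC =====
def Spec_phanTach (s : String) (out : String) : Prop := out = phanTach_alt s
instance (s : String) (out : String) : Decidable (Spec_phanTach s out) := by unfold Spec_phanTach; infer_instance

-- ===== CLAIM (what is proved, stated in full; the proofs are below) =====
def Claim_equal_phanTach : Prop := ∀ (s : String), Dom_phanTach s → Spec_phanTach s (phanTach s)

-- ===== LEMMAS AND PROOFS =====

-- what A's loop appends when run from counter state `count` over the remaining chars
def restF : Int → List Char → List (List Char)
  | _, [] => []
  | count, c :: cs =>
    if count == 3 then ['.'] :: [c] :: restF 1 cs else [c] :: restF (count + 1) cs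

-- the 3-chunks of cs (what B's slices produce)
def chunk3 : List Char → List (List Char)
  | [] => []
  | [a] => [[a]]
  | [a, b] => [[a, b]]
  | a :: b :: c :: t => [a, b, c] :: chunk3 t

lemma chunk3_cons (a : Char) (rest : List Char) :
    chunk3 (a :: rest) = (a :: rest.take 2) :: chunk3 (rest.drop 2) := by
  match rest with
  | [] => rfl
  | [b] => rfl
  | b :: c :: t => rfl

lemma foldl_step_eq (cs : List Char) : ∀ (count : Int) (lst : List (List Char)),
    (cs.foldl phanTachStep (count, lst)).2 = lst ++ restF count cs := by
  induction cs with
  | nil => intro count lst; simp [restF]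
  | cons c cs ih =>
    intro count lst
    by_cases h : count = 3 <;> simp [phanTachStep, restF, h, ih]

lemma slice3 (cs : List Char) (k : Nat) :
    PySem.List.slice cs (some ((0:Int) + 3 * (k:Int))) (some ((0:Int) + 3 * (k:Int) + 3))
      = (cs.drop (3*k)).take 3 := by
  rw [show ((0:Int) + 3 * (k:Int)) = ((3*k : Nat) : Int) by push_cast; ring]
  rw [show ((3*k : Nat) : Int) + 3 = ((3*k+3 : Nat) : Int) by push_cast; ring]
  rw [PySem.List.slice_natCast]
  congr 1
  omega

lemma range_chunks (m : Nat) : ∀ (cs : List Char), m = (cs.length + 2) / 3 →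
    (List.range m).map (fun k => (cs.drop (3*k)).take 3) = chunk3 cs := by
  induction m with
  | zero =>
    intro cs h
    cases cs with
    | nil => rfl
    | cons a t => exfalso; simp at h; omega
  | succ m ih =>
    intro cs h
    cases cs with
    | nil => simp at h
    | cons a rest =>
      rw [List.range_succ_eq_map, List.map_cons, List.map_map]
      have h0 : (List.drop (3*0) (a :: rest)).take 3 = a :: rest.take 2 := by
        cases rest with
        | nil => rfl
        | cons b t => cases t with
          | nil => rfl
          | cons c u => rfl
      have htail : List.map ((fun k => (List.drop (3*k) (a :: rest)).take 3) ∘ Nat.succ) (List.range m)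
          = List.map (fun k => ((rest.drop 2).drop (3*k)).take 3) (List.range m) := by
        apply List.map_congr_left
        intro k _
        show (List.drop (3*(k+1)) (a :: rest)).take 3 = ((rest.drop 2).drop (3*k)).take 3
        rw [List.drop_drop, show 3*(k+1) = (3*k+2)+1 by omega, List.drop_succ_cons]
        congr 2
        omega
      rw [h0, htail, ih (rest.drop 2) (by simp only [List.length_cons, List.length_drop] at h ⊢; omega), chunk3_cons]

lemma chunks_eq (cs : List Char) :
    (PySem.List.pyRange 0 (PySem.List.len cs) 3).map
      (fun i => PySem.List.slice cs (some i) (some (i + 3))) = chunk3 cs := by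
  rw [PySem.List.pyRange_of_pos 0 (PySem.List.len cs) (by norm_num), List.map_map]
  have hm : (if (0:Int) < PySem.List.len cs then ((PySem.List.len cs - 0 + 3 - 1) / 3).toNat else 0)
      = (cs.length + 2) / 3 := by
    simp only [PySem.List.len]
    split_ifs with h
    · rw [show ((cs.length : Int) - 0 + 3 - 1) = ((cs.length + 2 : Nat) : Int) by push_cast; ring]
      rw [show ((3:Int)) = ((3:Nat) : Int) by norm_num, ← Int.natCast_div, Int.toNat_natCast]
    · have : cs.length = 0 := by omega
      simp [this]
  rw [hm]
  refine Eq.trans (List.map_congr_left ?_) (range_chunks _ cs rfl)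
  intro k _
  exact slice3 cs k

-- the rendering of one chunk on B's side
def render (ch : List Char) : List Char := PySem.Chars.join [' '] (ch.map (fun c => [c]))

lemma join_eq (cs : List Char) :
    PySem.Chars.join [' '] (restF 0 cs)
      = PySem.Chars.join [' ', '.', ' '] ((chunk3 cs).map render) := by
  induction cs using chunk3.induct with
  | case1 => simp [restF, chunk3, PySem.Chars.join_nil]
  | case2 a => simp [restF, chunk3, render, PySem.Chars.join_singleton]
  | case3 a b => simp [restF, chunk3, render, PySem.Chars.join_singleton, PySem.Chars.join_cons_cons]
  | case4 a b c t ih =>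
    cases t with
    | nil =>
      simp [restF, chunk3, render, PySem.Chars.join_singleton, PySem.Chars.join_cons_cons]
    | cons d t' =>
      have ihr := ih
      rw [show restF 0 (d :: t') = [d] :: restF 1 t' by simp [restF],
          chunk3_cons d t', List.map_cons] at ihr
      rw [show restF 0 (a :: b :: c :: d :: t')
            = [a] :: [b] :: [c] :: ['.'] :: [d] :: restF 1 t' by simp [restF],
          show chunk3 (a :: b :: c :: d :: t') = [a, b, c] :: chunk3 (d :: t') from rfl,
          List.map_cons, chunk3_cons d t', List.map_cons,
          PySem.Chars.join_cons_cons [' ', '.', ' '] (render [a, b, c]), ← ihr]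
      simp [render, PySem.Chars.join_cons_cons, PySem.Chars.join_singleton]

lemma core_eq (cs : List Char) :
    PySem.Chars.join [' ']
        ((cs.foldl phanTachStep ((0:Int), ([] : List (List Char)))).2)
      = PySem.Chars.join " . ".toList
        (((PySem.List.pyRange 0 (PySem.List.len cs) 3).map
            (fun i => PySem.List.slice cs (some i) (some (i + 3)))).map
          (fun ch => PySem.Chars.join [' '] (ch.map (fun c => [c])))) := by
  rw [foldl_step_eq cs 0 [], List.nil_append, chunks_eq]
  have : " . ".toList = [' ', '.', ' '] := rfl
  rw [this]
  exact join_eq cs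

-- ===== VERDICT (by name: the statement is the Claim_ definition above) =====
theorem phanTach_spec : Claim_equal_phanTach := by
  intro s _
  unfold Spec_phanTach phanTach phanTach_alt
  dsimp only []
  rw [PySem.List.foldl_pyRange_zero_pyGetD s.toList ' ' phanTachStep ((0:Int), ([] : List (List Char)))]
  rw [core_eq s.toList]
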